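-- pv_equiv track=rewrite | github.com/wistler/aoc-2022 | Day/10/mod.py | gen_timeline
-- ===== SOURCE A (Python) =====
-- def gen_timeline(inst: list):
--   X = 1
--   cycle = 1
--   timeline = [(cycle, X)]
--
--   for ins in inst:
--     cmd = ins.split()
--     if cmd[0] == 'noop':
--       cycle += 1
--     elif cmd[0] == 'addx':
--       cycle += 2
--       X += int(cmd[1])
--     timeline.append((cycle, X))
--
--   return timeline
-- ===== SOURCE B (Python) =====
-- def _delta(ins):
--     cmd = ins.split()
--     if cmd[0] == 'noop':
--         return (1, 0)
--     elif cmd[0] == 'addx':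
--         return (2, int(cmd[1]))
--     else:
--         return (0, 0)
--
--
-- def _scan(init, deltas):
--     out = [init]
--     for d in deltas:
--         out.append(out[-1] + d)
--     return out
--
--
-- def gen_timeline(inst: list):
--     deltas = [_delta(ins) for ins in inst]
--     cycles = _scan(1, [d[0] for d in deltas])
--     xs = _scan(1, [d[1] for d in deltas])
--     return list(zip(cycles, xs))
-- ===== Notes on version B (the rewrite author's own statement) =====
-- stated objective: alternative
-- what changed: Replaces A's single interleaved stateful loop with a per-instruction (cycle-delta, X-delta) table followed by two prefix-sum passes that are zipped into the timeline.
import Mathlib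
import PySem

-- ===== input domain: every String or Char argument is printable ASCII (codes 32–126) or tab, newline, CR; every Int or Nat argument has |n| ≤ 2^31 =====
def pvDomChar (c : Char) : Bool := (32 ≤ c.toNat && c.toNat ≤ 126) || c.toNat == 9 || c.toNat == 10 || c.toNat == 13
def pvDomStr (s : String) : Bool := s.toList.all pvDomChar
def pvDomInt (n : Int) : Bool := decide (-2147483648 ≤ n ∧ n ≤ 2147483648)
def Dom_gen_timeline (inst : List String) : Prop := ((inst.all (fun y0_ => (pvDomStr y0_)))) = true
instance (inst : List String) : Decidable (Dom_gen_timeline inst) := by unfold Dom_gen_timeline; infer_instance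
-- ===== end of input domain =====

-- B replaces A's interleaved stateful loop by a per-instruction delta table plus two
-- prefix-sum passes zipped together (objective: alternative decomposition, same cost).

-- ===== PORT A =====
-- A's loop over inst carrying (X, cycle), appending (cycle, X) after each instruction.
def genLoopA (inst : List String) (X cycle : Int) : List (Int × Int) :=
  match inst with
  | [] => []
  | ins :: rest =>
    let cmd := PySem.Str.split₀ ins
    if (PySem.List.pyGet? cmd 0).getD "" = "noop" then
      (cycle + 1, X) :: genLoopA rest X (cycle + 1)
    else if (PySem.List.pyGet? cmd 0).getD "" = "addx" then
      let x' := X + (PySem.Int.ofStr? ((PySem.List.pyGet? cmd 1).getD "")).getD 0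
      (cycle + 2, x') :: genLoopA rest x' (cycle + 2)
    else
      (cycle, X) :: genLoopA rest X cycle

def gen_timeline (inst : List String) : List (Int × Int) :=
  (1, 1) :: genLoopA inst 1 1

-- ===== PORT B =====
-- _delta in Source B
def pvDelta (ins : String) : Int × Int :=
  let cmd := PySem.Str.split₀ ins
  if (PySem.List.pyGet? cmd 0).getD "" = "noop" then (1, 0)
  else if (PySem.List.pyGet? cmd 0).getD "" = "addx" then
    (2, (PySem.Int.ofStr? ((PySem.List.pyGet? cmd 1).getD "")).getD 0)
  else (0, 0)

-- _scan in Source B: running prefix sums starting at init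
def pvScan (init : Int) : List Int → List Int
  | [] => [init]
  | d :: ds => init :: pvScan (init + d) ds

def gen_timeline_alt (inst : List String) : List (Int × Int) :=
  let deltas := inst.map pvDelta
  List.zip (pvScan 1 (deltas.map Prod.fst)) (pvScan 1 (deltas.map Prod.snd))

-- ===== PRECONDITION & SPEC =====
-- Pre_ excludes exactly the inputs where the Python A raises: an instruction whose
-- split is empty (cmd[0] → IndexError) or an 'addx' without a second int-parsable
-- word (IndexError / ValueError).  B raises identically there.
def Pre_gen_timeline (inst : List String) : Prop :=
  ∀ ins ∈ inst,
    PySem.Str.split₀ ins ≠ [] ∧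
    ((PySem.Str.split₀ ins).headD "" = "addx" →
      2 ≤ (PySem.Str.split₀ ins).length ∧
      (PySem.Int.ofStr? ((PySem.Str.split₀ ins).getD 1 "")).isSome)
instance (inst : List String) : Decidable (Pre_gen_timeline inst) := by
  unfold Pre_gen_timeline; infer_instance

def pvWitness_gen_timeline : List String := ["addx 3", "noop", "addx -5", "flip"]

def Spec_gen_timeline (inst : List String) (out : List (Int × Int)) : Prop := out = gen_timeline_alt inst
instance (inst : List String) (out : List (Int × Int)) : Decidable (Spec_gen_timeline inst out) := by unfold Spec_gen_timeline; infer_instance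

-- ===== CLAIM (what is proved, stated in full; the proofs are below) =====
def Claim_equal_gen_timeline : Prop := ∀ (inst : List String), Dom_gen_timeline inst → Pre_gen_timeline inst → Spec_gen_timeline inst (gen_timeline inst)

-- ===== LEMMAS AND PROOFS =====

-- A's loop from any state (X, cycle) equals the zipped prefix sums seeded at that state.
theorem genLoopA_eq_zip (inst : List String) (X cycle : Int) :
    (cycle, X) :: genLoopA inst X cycle =
      List.zip (pvScan cycle ((inst.map pvDelta).map Prod.fst))
               (pvScan X ((inst.map pvDelta).map Prod.snd)) := by
  induction inst generalizing X cycle with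
  | nil => simp [genLoopA, pvScan]
  | cons ins rest ih =>
    simp only [genLoopA, List.map_cons, pvScan, List.zip_cons_cons, pvDelta]
    split_ifs with h1 h2 <;> simp only [← ih] <;> ring_nf

-- ===== VERDICT (by name: the statement is the Claim_ definition above) =====
theorem gen_timeline_spec : Claim_equal_gen_timeline := by
  intro inst _ _
  unfold Spec_gen_timeline gen_timeline gen_timeline_alt
  exact genLoopA_eq_zip inst 1 1
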